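-- pv_equiv track=rewrite | github.com/elizabethkhoury/livingdiscussionagent | src/learn/diary_memory.py | _parse_fourth_level_sections
-- ===== SOURCE A (Python) =====
-- def _parse_fourth_level_sections(lines: list[str]):
--     sections: dict[str, list[str]] = {}
--     current_heading: str | None = None
--     for line in lines:
--         if line.startswith("#### "):
--             current_heading = line.removeprefix("#### ").strip()
--             sections.setdefault(current_heading, [])
--         elif current_heading is not None:
--             sections[current_heading].append(line)
--     return {heading: "\n".join(content).strip() for heading, content in sections.items()}
-- ===== SOURCE B (Python) =====
-- def _parse_fourth_level_sections(lines: list[str]):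
--     # Phase 1: split into (heading, content-slice) segments by scanning for heading indices.
--     segments = []
--     i = 0
--     n = len(lines)
--     while i < n:
--         if not lines[i].startswith("#### "):
--             i += 1
--             continue
--         heading = lines[i].removeprefix("#### ").strip()
--         j = i + 1
--         while j < n and not lines[j].startswith("#### "):
--             j += 1
--         segments.append((heading, lines[i + 1:j]))
--         i = j
--     # Phase 2: merge segments of a repeated heading, preserving first-occurrence order.
--     merged = {}
--     for heading, content in segments:
--         merged.setdefault(heading, []).extend(content)
--     return {h: "\n".join(c).strip() for h, c in merged.items()}
-- ===== Notes on version B (the rewrite author's own statement) =====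
-- stated objective: alternative
-- what changed: B replaces A's single stateful line-by-line fold (current-heading register plus dict mutation per line) by a two-phase algorithm: first split the lines into (heading, content-slice) segments by scanning for heading positions, then fold the segments into the dict, merging repeated headings.
import Mathlib
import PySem

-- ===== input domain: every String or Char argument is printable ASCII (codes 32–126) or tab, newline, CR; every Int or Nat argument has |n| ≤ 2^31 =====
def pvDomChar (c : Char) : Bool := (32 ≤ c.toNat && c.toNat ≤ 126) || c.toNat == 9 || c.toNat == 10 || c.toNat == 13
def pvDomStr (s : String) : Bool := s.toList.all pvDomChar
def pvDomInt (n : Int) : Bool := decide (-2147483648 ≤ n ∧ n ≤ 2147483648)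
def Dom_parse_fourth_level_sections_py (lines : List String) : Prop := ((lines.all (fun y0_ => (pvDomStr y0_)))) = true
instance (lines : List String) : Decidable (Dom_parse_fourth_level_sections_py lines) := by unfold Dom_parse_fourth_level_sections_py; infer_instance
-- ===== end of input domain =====

-- ===== PORT A =====
-- B differs from A in structure only: two-phase segmentation vs one stateful fold; same results.
-- shared Python primitive: str.removeprefix (not in PySem); exact: drops the prefix iff the string starts with it
def pyRemoveprefix (s p : String) : String :=
  if PySem.Str.startswith s p then String.ofList (s.toList.drop p.toList.length) else s

-- A's loop body: state = (sections dict, current_heading)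
def stepA (st : PySem.Dict String (List String) × Option String) (line : String) :
    PySem.Dict String (List String) × Option String :=
  if PySem.Str.startswith line "#### " then
    let h := PySem.Str.strip (pyRemoveprefix line "#### ")
    (st.1.setdefault h [], some h)
  else
    match st.2 with
    | some h => (st.1.modify h [] (fun c => c ++ [line]), some h)  -- sections[current].append(line); key always present, default unused
    | none => st

def parse_fourth_level_sections_py (lines : List String) : List (String × String) :=
  ((lines.foldl stepA (PySem.Dict.empty, none)).1).items.map
    (fun p => (p.1, PySem.Str.strip (PySem.Str.join "\n" p.2)))

-- ===== PORT B =====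
-- Phase 1 of Source B: the index/slice scan, as structural recursion with takeWhile/dropWhile for the inner while + slice
def segB : List String → List (String × List String)
  | [] => []
  | l :: ls =>
    if PySem.Str.startswith l "#### " then
      (PySem.Str.strip (pyRemoveprefix l "#### "),
        ls.takeWhile (fun x => !PySem.Str.startswith x "#### "))
        :: segB (ls.dropWhile (fun x => !PySem.Str.startswith x "#### "))
    else segB ls
  termination_by ls => ls.length
  decreasing_by
  · simpa using Nat.lt_succ_of_le (List.length_dropWhile_le _ _)
  · simp

-- Phase 2 of Source B: merged.setdefault(h, []).extend(c)
def mergeStepB (d : PySem.Dict String (List String)) (seg : String × List String) :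
    PySem.Dict String (List String) :=
  d.modify seg.1 [] (fun c => c ++ seg.2)

def parse_fourth_level_sections_py_alt (lines : List String) : List (String × String) :=
  (((segB lines).foldl mergeStepB PySem.Dict.empty).items).map
    (fun p => (p.1, PySem.Str.strip (PySem.Str.join "\n" p.2)))

-- ===== PRECONDITION & SPEC =====
def Spec_parse_fourth_level_sections_py (lines : List String) (out : List (String × String)) : Prop := out = parse_fourth_level_sections_py_alt lines
instance (lines : List String) (out : List (String × String)) : Decidable (Spec_parse_fourth_level_sections_py lines out) := by unfold Spec_parse_fourth_level_sections_py; infer_instance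

-- ===== CLAIM (what is proved, stated in full; the proofs are below) =====
def Claim_equal_parse_fourth_level_sections_py : Prop := ∀ (lines : List String), Dom_parse_fourth_level_sections_py lines → Spec_parse_fourth_level_sections_py lines (parse_fourth_level_sections_py lines)

-- ===== LEMMAS AND PROOFS =====

def pvKeysNodup {κ ν : Type} (d : PySem.Dict κ ν) : Prop := (d.items.map Prod.fst).Nodup

-- a key absent from the association list: the insert-replacement map is the identity
lemma map_replace_of_not_any {κ ν : Type} [BEq κ] [LawfulBEq κ]
    (l : List (κ × ν)) (k : κ) (v : ν) (h : l.any (fun p => p.1 == k) = false) :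
    l.map (fun p => if p.1 == k then (k, v) else p) = l := by
  induction l with
  | nil => rfl
  | cons p t ih =>
    simp only [List.any_cons, Bool.or_eq_false_iff] at h
    simp [h.1, ih h.2]

lemma insert_of_contains {κ ν : Type} [BEq κ] (d : PySem.Dict κ ν) (k : κ) (v : ν)
    (h : d.contains k = true) :
    d.insert k v = ⟨d.items.map (fun p => if p.1 == k then (k, v) else p)⟩ := by
  simp [PySem.Dict.insert, h]

lemma insert_of_not_contains {κ ν : Type} [BEq κ] (d : PySem.Dict κ ν) (k : κ) (v : ν)
    (h : ¬ d.contains k = true) :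
    d.insert k v = ⟨d.items ++ [(k, v)]⟩ := by
  simp [PySem.Dict.insert, h]

lemma insert_insert_same {κ ν : Type} [BEq κ] [LawfulBEq κ]
    (d : PySem.Dict κ ν) (k : κ) (a b : ν) :
    (d.insert k a).insert k b = d.insert k b := by
  rw [insert_of_contains _ k b (PySem.Dict.contains_insert_self d k a)]
  by_cases h : d.contains k = true
  · rw [insert_of_contains d k a h, insert_of_contains d k b h]
    simp only [PySem.Dict.mk.injEq, List.map_map]
    refine List.map_congr_left ?_
    intro p _
    by_cases hp : (p.1 == k) = true <;> simp [hp, Function.comp]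
  · rw [insert_of_not_contains d k a h, insert_of_not_contains d k b h]
    have hany : d.items.any (fun p => p.1 == k) = false := Bool.eq_false_iff.mpr h
    simp [map_replace_of_not_any _ _ _ hany]

lemma not_any_of_not_mem_keys {κ ν : Type} [BEq κ] [LawfulBEq κ]
    (l : List (κ × ν)) (k : κ) (h : k ∉ l.map Prod.fst) :
    l.any (fun p => p.1 == k) = false := by
  simp only [List.any_eq_false]
  intro p hp hbeq
  exact h (List.mem_map.mpr ⟨p, hp, eq_of_beq hbeq⟩)

lemma replace_found_of_nodup {κ ν : Type} [BEq κ] [LawfulBEq κ]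
    (l : List (κ × ν)) (k : κ) (v : ν) (hnd : (l.map Prod.fst).Nodup)
    (hf : l.find? (fun p => p.1 == k) = some (k, v)) :
    l.map (fun p => if p.1 == k then (k, v) else p) = l := by
  induction l with
  | nil => simp at hf
  | cons p t ih =>
    simp only [List.map_cons, List.nodup_cons] at hnd
    by_cases hp : (p.1 == k) = true
    · rw [List.find?_cons_of_pos (p := fun q => q.1 == k) (a := p) hp] at hf
      have hpv : p = (k, v) := by simpa using hf
      have hk : p.1 = k := eq_of_beq hp
      have htid : t.map (fun p => if p.1 == k then (k, v) else p) = t :=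
        map_replace_of_not_any t k v (not_any_of_not_mem_keys t k (hk ▸ hnd.1))
      simp [htid, hpv]
    · rw [List.find?_cons_of_neg (p := fun q => q.1 == k) (a := p) hp] at hf
      simp [hp, ih hnd.2 hf]

lemma getD_eq_of_find? {κ ν : Type} [BEq κ] (d : PySem.Dict κ ν) (k : κ) (v d0 : ν)
    (hf : d.items.find? (fun p => p.1 == k) = some (k, v)) :
    d.getD k d0 = v := by
  simp [PySem.Dict.getD, PySem.Dict.get?, hf]

lemma find?_self_of_contains {κ ν : Type} [BEq κ] [LawfulBEq κ]
    (d : PySem.Dict κ ν) (k : κ) (hc : d.contains k = true) :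
    ∃ v, d.items.find? (fun p => p.1 == k) = some (k, v) := by
  have : ∃ p ∈ d.items, (p.1 == k) = true := by
    simpa [PySem.Dict.contains, List.any_eq_true] using hc
  have hs : (d.items.find? (fun p => p.1 == k)).isSome := by
    rw [List.find?_isSome]; exact this
  obtain ⟨q, hq⟩ := Option.isSome_iff_exists.mp hs
  have hq1 : (q.1 == k) = true := List.find?_eq_some_iff_append.mp hq |>.1
  exact ⟨q.2, by rw [hq]; congr 1; exact Prod.ext (eq_of_beq hq1) rfl⟩

-- inserting a key's own current value changes nothing (keys unique, key present)
lemma insert_getD_self {κ ν : Type} [BEq κ] [LawfulBEq κ]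
    (d : PySem.Dict κ ν) (k : κ) (d0 : ν)
    (hnd : pvKeysNodup d) (hc : d.contains k = true) :
    d.insert k (d.getD k d0) = d := by
  obtain ⟨v, hf⟩ := find?_self_of_contains d k hc
  rw [getD_eq_of_find? d k v d0 hf, insert_of_contains d k v hc,
      replace_found_of_nodup d.items k v hnd hf]

lemma keysNodup_insert {κ ν : Type} [BEq κ] [LawfulBEq κ]
    (d : PySem.Dict κ ν) (k : κ) (v : ν) (hnd : pvKeysNodup d) :
    pvKeysNodup (d.insert k v) := by
  by_cases h : d.contains k = true
  · rw [insert_of_contains d k v h]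
    have : (d.items.map (fun p => if p.1 == k then (k, v) else p)).map Prod.fst
        = d.items.map Prod.fst := by
      simp only [List.map_map]
      refine List.map_congr_left ?_
      intro p _
      by_cases hp : (p.1 == k) = true
      · simp [Function.comp, eq_of_beq hp]
      · simp [hp, Function.comp]
    unfold pvKeysNodup
    simpa [this] using hnd
  · rw [insert_of_not_contains d k v h]
    have hk : k ∉ d.items.map Prod.fst := by
      intro hmem
      obtain ⟨p, hp, hpk⟩ := List.mem_map.mp hmem
      exact h (by simp only [PySem.Dict.contains, List.any_eq_true]; exact ⟨p, hp, by simp [hpk]⟩)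
    unfold pvKeysNodup
    simp only [List.map_append, List.map_cons, List.map_nil]
    exact List.Nodup.append hnd (List.nodup_singleton k) (by simpa using hk)

lemma setdefault_of_contains {κ ν : Type} [BEq κ] (d : PySem.Dict κ ν) (k : κ) (v : ν)
    (h : d.contains k = true) : d.setdefault k v = d := by
  simp [PySem.Dict.setdefault, h]

lemma setdefault_of_not_contains {κ ν : Type} [BEq κ] (d : PySem.Dict κ ν) (k : κ) (v : ν)
    (h : ¬ d.contains k = true) : d.setdefault k v = ⟨d.items ++ [(k, v)]⟩ := by
  simp [PySem.Dict.setdefault, h]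

lemma setdefault_eq_ite_insert {κ ν : Type} [BEq κ] (d : PySem.Dict κ ν) (k : κ) (v : ν)
    (h : ¬ d.contains k = true) : d.setdefault k v = d.insert k v := by
  rw [setdefault_of_not_contains d k v h, insert_of_not_contains d k v h]

lemma keysNodup_setdefault {κ ν : Type} [BEq κ] [LawfulBEq κ]
    (d : PySem.Dict κ ν) (k : κ) (v : ν) (hnd : pvKeysNodup d) :
    pvKeysNodup (d.setdefault k v) := by
  by_cases h : d.contains k = true
  · rwa [setdefault_of_contains d k v h]
  · rw [setdefault_eq_ite_insert d k v h]
    exact keysNodup_insert d k v hnd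

lemma contains_setdefault_self {κ ν : Type} [BEq κ] [LawfulBEq κ]
    (d : PySem.Dict κ ν) (k : κ) (v : ν) : (d.setdefault k v).contains k = true := by
  by_cases h : d.contains k = true
  · rwa [setdefault_of_contains d k v h]
  · rw [setdefault_eq_ite_insert d k v h]
    exact PySem.Dict.contains_insert_self d k v

lemma getD_setdefault_self {κ ν : Type} [BEq κ] [LawfulBEq κ]
    (d : PySem.Dict κ ν) (k : κ) (v : ν) : (d.setdefault k v).getD k v = d.getD k v := by
  by_cases h : d.contains k = true
  · rw [setdefault_of_contains d k v h]
  · rw [setdefault_eq_ite_insert d k v h, PySem.Dict.getD_insert_self]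
    have hf : d.items.find? (fun p => p.1 == k) = none := by
      rw [List.find?_eq_none]
      intro p hp hbeq
      exact h (by simp only [PySem.Dict.contains, List.any_eq_true]; exact ⟨p, hp, hbeq⟩)
    simp [PySem.Dict.getD, PySem.Dict.get?, hf]

lemma insert_setdefault_same {κ ν : Type} [BEq κ] [LawfulBEq κ]
    (d : PySem.Dict κ ν) (k : κ) (v w : ν) :
    (d.setdefault k v).insert k w = d.insert k w := by
  by_cases h : d.contains k = true
  · rw [setdefault_of_contains d k v h]
  · rw [setdefault_eq_ite_insert d k v h, insert_insert_same]

-- the predicate both ports scan with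
lemma chunk_lemma (ls : List String) : ∀ (d : PySem.Dict String (List String)) (h : String),
    pvKeysNodup d → d.contains h = true →
    (ls.foldl stepA (d, some h)).1
      = (segB (ls.dropWhile (fun x => !PySem.Str.startswith x "#### "))).foldl mergeStepB
          (d.insert h (d.getD h [] ++ ls.takeWhile (fun x => !PySem.Str.startswith x "#### "))) := by
  induction ls with
  | nil =>
    intro d h hnd hc
    simp [segB]
    exact (insert_getD_self d h [] hnd hc).symm
  | cons l t ih =>
    intro d h hnd hc
    by_cases hl : PySem.Str.startswith l "#### " = true
    · -- l is a heading: A switches current heading, B starts a new segment here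
      have hl' : PySem.Chars.startswith l.toList ['#','#','#','#',' '] = true := by
        simpa using hl
      have hA : ((l :: t).foldl stepA (d, some h)).1
          = (t.foldl stepA (d.setdefault (PySem.Str.strip (pyRemoveprefix l "#### ")) [],
              some (PySem.Str.strip (pyRemoveprefix l "#### ")))).1 := by
        simp [List.foldl_cons, stepA, hl']
      rw [hA, ih _ _ (keysNodup_setdefault d _ [] hnd) (contains_setdefault_self d _ []),
        insert_setdefault_same, getD_setdefault_self]
      simp only [List.takeWhile_cons, List.dropWhile_cons, hl, Bool.not_true,
        Bool.false_eq_true, if_false, List.append_nil]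
      rw [insert_getD_self d h [] hnd hc, segB]
      simp [hl', mergeStepB, PySem.Dict.modify]
    · -- l is content of the current heading
      have hl' : PySem.Chars.startswith l.toList ['#','#','#','#',' '] = false := by
        have := Bool.eq_false_iff.mpr hl
        simpa using this
      have hA : ((l :: t).foldl stepA (d, some h)).1
          = (t.foldl stepA (d.insert h (d.getD h [] ++ [l]), some h)).1 := by
        simp [List.foldl_cons, stepA, hl', PySem.Dict.modify]
      rw [hA, ih _ _ (keysNodup_insert d h _ hnd) (PySem.Dict.contains_insert_self d h _)]
      simp [hl', insert_insert_same, PySem.Dict.getD_insert_self]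

lemma main_lemma (lines : List String) : ∀ (d : PySem.Dict String (List String)),
    pvKeysNodup d →
    (lines.foldl stepA (d, none)).1 = (segB lines).foldl mergeStepB d := by
  induction lines with
  | nil => intro d _; simp [segB]
  | cons l t ih =>
    intro d hnd
    by_cases hl : PySem.Str.startswith l "#### " = true
    · have hl' : PySem.Chars.startswith l.toList ['#','#','#','#',' '] = true := by
        simpa using hl
      have hA : ((l :: t).foldl stepA (d, none)).1
          = (t.foldl stepA (d.setdefault (PySem.Str.strip (pyRemoveprefix l "#### ")) [],
              some (PySem.Str.strip (pyRemoveprefix l "#### ")))).1 := by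
        simp [List.foldl_cons, stepA, hl']
      rw [hA, chunk_lemma _ _ _ (keysNodup_setdefault d _ [] hnd) (contains_setdefault_self d _ []),
        insert_setdefault_same, getD_setdefault_self, segB]
      simp [hl', mergeStepB, PySem.Dict.modify]
    · have hl' : PySem.Chars.startswith l.toList ['#','#','#','#',' '] = false := by
        have := Bool.eq_false_iff.mpr hl
        simpa using this
      have hA : ((l :: t).foldl stepA (d, none)).1 = (t.foldl stepA (d, none)).1 := by
        simp [List.foldl_cons, stepA, hl']
      rw [hA, ih d hnd, segB]
      simp [hl']

-- ===== VERDICT (by name: the statement is the Claim_ definition above) =====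
theorem parse_fourth_level_sections_py_spec : Claim_equal_parse_fourth_level_sections_py := by
  intro lines _
  unfold Spec_parse_fourth_level_sections_py parse_fourth_level_sections_py parse_fourth_level_sections_py_alt
  rw [main_lemma lines PySem.Dict.empty (by simp [pvKeysNodup, PySem.Dict.empty])]
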